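-- pv_equiv track=rewrite | github.com/marcin-sucharski/review | src/review/format_review.py | _fence_for
-- ===== SOURCE A (Python) =====
-- def _fence_for(lines: list[str], fence_char: str = "`") -> str:
--     longest = 2
--     for line in lines:
--         current = 0
--         for char in line:
--             if char == fence_char:
--                 current += 1
--                 longest = max(longest, current)
--             else:
--                 current = 0
--     return fence_char * (longest + 1)
-- ===== SOURCE B (Python) =====
-- def _fence_for(lines: list[str], fence_char: str = "`") -> str:
--     longest = 2
--     for line in lines:
--         i, n = 0, len(line)
--         while i < n:
--             j = i
--             while j < n and line[j] == line[i]: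
--                 j += 1
--             if line[i] == fence_char and j - i > longest:
--                 longest = j - i
--             i = j
--     return fence_char * (longest + 1)
-- ===== Notes on version B (the rewrite author's own statement) =====
-- stated objective: alternative
-- what changed: Replaces the per-character accumulator (current run counter reset on mismatch, running max updated at every matching character) with a run-length scan: a two-pointer loop finds each maximal run of equal characters at once and compares the whole run's length against the maximum only at run boundaries.
import Mathlib
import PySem

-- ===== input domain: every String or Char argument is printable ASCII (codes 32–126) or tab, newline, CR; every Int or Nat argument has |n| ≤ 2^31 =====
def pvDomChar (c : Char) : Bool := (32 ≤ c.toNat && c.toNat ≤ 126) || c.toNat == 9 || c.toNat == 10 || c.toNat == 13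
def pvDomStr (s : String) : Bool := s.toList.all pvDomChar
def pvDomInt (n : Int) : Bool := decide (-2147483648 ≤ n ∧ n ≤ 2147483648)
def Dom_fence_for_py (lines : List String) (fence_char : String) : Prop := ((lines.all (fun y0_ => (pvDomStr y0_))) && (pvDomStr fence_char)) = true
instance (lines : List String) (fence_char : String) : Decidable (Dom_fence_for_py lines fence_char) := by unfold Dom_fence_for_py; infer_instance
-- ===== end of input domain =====

-- B replaces A's per-character run counter with a two-pointer run-length scan; same cost, different decomposition (objective: alternative).


-- ===== PORT A =====
-- inner loop: 'for char in line' with state (current, longest)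
def fenceAStep (fc : List Char) (s : Nat × Nat) (c : Char) : Nat × Nat :=
  if fc = [c] then (s.1 + 1, max s.2 (s.1 + 1)) else (0, s.2)

def fence_for_py (lines : List String) (fence_char : String) : String :=
  let longest := lines.foldl
    (fun (longest : Nat) line => (line.toList.foldl (fenceAStep fence_char.toList) (0, longest)).2) 2
  String.ofList (PySem.List.pyRepeat fence_char.toList ((longest : Int) + 1))

-- ===== PORT B =====
-- inner while-loops of Source B: peel one maximal run (takeWhile/dropWhile = the j-scan), compare its length once
def fenceBRuns (fc : List Char) : List Char → Nat → Nat
  | [], longest => longest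
  | c :: cs, longest =>
      let run := (cs.takeWhile (· == c)).length + 1
      fenceBRuns fc (cs.dropWhile (· == c))
        (if fc = [c] ∧ longest < run then run else longest)
  termination_by l => l.length
  decreasing_by
    simp only [List.length_cons]
    exact Nat.lt_succ_of_le (List.length_dropWhile_le _ _)

def fence_for_py_alt (lines : List String) (fence_char : String) : String :=
  let longest := lines.foldl (fun (longest : Nat) line => fenceBRuns fence_char.toList line.toList longest) 2
  String.ofList (PySem.List.pyRepeat fence_char.toList ((longest : Int) + 1))

-- ===== PRECONDITION & SPEC =====
def Spec_fence_for_py (lines : List String) (fence_char : String) (out : String) : Prop := out = fence_for_py_alt lines fence_char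
instance (lines : List String) (fence_char : String) (out : String) : Decidable (Spec_fence_for_py lines fence_char out) := by unfold Spec_fence_for_py; infer_instance

-- ===== CLAIM (what is proved, stated in full; the proofs are below) =====
def Claim_equal_fence_for_py : Prop := ∀ (lines : List String) (fence_char : String), Dom_fence_for_py lines fence_char → Spec_fence_for_py lines fence_char (fence_for_py lines fence_char)

-- ===== LEMMAS AND PROOFS =====

-- A's fold over a block of characters all equal to the fence char
theorem fenceA_fold_match (fc : List Char) (c : Char) (hc : fc = [c]) :
    ∀ (pre : List Char), (∀ x ∈ pre, x = c) → ∀ (k L : Nat), k ≤ L →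
      pre.foldl (fenceAStep fc) (k, L) = (k + pre.length, max L (k + pre.length)) := by
  intro pre
  induction pre with
  | nil => intro _ k L hkL; simp; omega
  | cons x xs ih =>
      intro h k L hkL
      have hx : x = c := h x (by simp)
      have hxs : ∀ y ∈ xs, y = c := fun y hy => h y (by simp [hy])
      have hstep : fenceAStep fc (k, L) x = (k + 1, max L (k + 1)) := by
        simp [fenceAStep, hx, hc]
      rw [List.foldl_cons, hstep, ih hxs (k + 1) (max L (k + 1)) (by omega)]
      simp only [List.length_cons, Prod.mk.injEq]
      constructor <;> omega

-- A's fold over a block of characters none of which is the fence char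
theorem fenceA_fold_nomatch (fc : List Char) :
    ∀ (pre : List Char), (∀ x ∈ pre, fc ≠ [x]) → ∀ (k L : Nat),
      pre.foldl (fenceAStep fc) (k, L) = (if pre = [] then k else 0, L) := by
  intro pre
  induction pre with
  | nil => intro _ k L; simp
  | cons x xs ih =>
      intro h k L
      have hx : fc ≠ [x] := h x (by simp)
      have hxs : ∀ y ∈ xs, fc ≠ [y] := fun y hy => h y (by simp [hy])
      simp only [List.foldl_cons, fenceAStep, if_neg hx]
      rw [ih hxs 0 L]
      by_cases hxs' : xs = [] <;> simp [hxs']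

-- A's fold ignores the incoming 'current' when the tail is empty or starts with a non-fence char
theorem fenceA_fold_reset (fc : List Char) (suf : List Char)
    (h : suf = [] ∨ ∃ d ds, suf = d :: ds ∧ fc ≠ [d]) (k L : Nat) :
    (suf.foldl (fenceAStep fc) (k, L)).2 = (suf.foldl (fenceAStep fc) (0, L)).2 := by
  rcases h with h | ⟨d, ds, rfl, hd⟩
  · simp [h]
  · simp [fenceAStep, if_neg hd]

-- main equivalence of the two inner loops
theorem fence_inner_eq (fc : List Char) (cs : List Char) (L : Nat) :
      (cs.foldl (fenceAStep fc) (0, L)).2 = fenceBRuns fc cs L := by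
  induction cs, L using fenceBRuns.induct fc with
  | case1 L => simp [fenceBRuns]
  | case2 c cs L run ih =>
      have hrun : run = (cs.takeWhile (· == c)).length + 1 := rfl
      rw [hrun] at ih
      simp only [dite_eq_ite] at ih
      have hprec : ∀ x ∈ cs.takeWhile (· == c), x = c := by
        intro x hx
        have := List.mem_takeWhile_imp hx
        simpa using this
      have hsufh : (cs.dropWhile (· == c)) = [] ∨
          ∃ d ds, (cs.dropWhile (· == c)) = d :: ds ∧ ¬ d = c := by
        cases h : cs.dropWhile (· == c) with
        | nil => exact Or.inl rfl
        | cons d ds =>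
            refine Or.inr ⟨d, ds, rfl, ?_⟩
            have hd := List.head_dropWhile_not (· == c) (l := cs) (by rw [h]; simp)
            simp [h] at hd
            exact hd
      have hB : fenceBRuns fc (c :: cs) L =
          fenceBRuns fc (cs.dropWhile (· == c))
            (if fc = [c] ∧ L < (cs.takeWhile (· == c)).length + 1
             then (cs.takeWhile (· == c)).length + 1 else L) := by
        rw [fenceBRuns]
      have hsplit : c :: cs = (c :: cs.takeWhile (· == c)) ++ cs.dropWhile (· == c) := by
        simp
      rw [hB, hsplit, List.foldl_append]
      by_cases hc : fc = [c]
      · -- matching run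
        have hhead : (c :: cs.takeWhile (· == c)).foldl (fenceAStep fc) (0, L) =
            ((cs.takeWhile (· == c)).length + 1,
             max L ((cs.takeWhile (· == c)).length + 1)) := by
          have hstep : fenceAStep fc (0, L) c = (1, max L 1) := by
            simp [fenceAStep, hc]
          rw [List.foldl_cons, hstep,
            fenceA_fold_match fc c hc _ hprec 1 (max L 1) (by omega)]
          simp only [Prod.mk.injEq]
          omega
        have hres : (cs.dropWhile (· == c)) = [] ∨
            ∃ d ds, (cs.dropWhile (· == c)) = d :: ds ∧ fc ≠ [d] := by
          rcases hsufh with h | ⟨d, ds, hdds, hd⟩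
          · exact Or.inl h
          · refine Or.inr ⟨d, ds, hdds, fun hfc => hd ?_⟩
            rw [hc] at hfc
            injection hfc.symm
        have hif : (if fc = [c] ∧ L < (cs.takeWhile (· == c)).length + 1
            then (cs.takeWhile (· == c)).length + 1 else L) =
            max L ((cs.takeWhile (· == c)).length + 1) := by
          simp only [hc, true_and]
          split <;> omega
        rw [hif] at ih
        rw [hhead, hif, fenceA_fold_reset fc _ hres]
        exact ih
      · -- non-matching head char
        have hall : ∀ x ∈ c :: cs.takeWhile (· == c), fc ≠ [x] := by
          intro x hx
          rcases List.mem_cons.mp hx with rfl | hx'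
          · exact hc
          · rw [hprec x hx']; exact hc
        have hif : (if fc = [c] ∧ L < (cs.takeWhile (· == c)).length + 1
            then (cs.takeWhile (· == c)).length + 1 else L) = L := by
          simp [hc]
        rw [hif] at ih
        rw [fenceA_fold_nomatch fc _ hall 0 L, hif]
        exact ih

theorem fence_lines_eq (fc : List Char) :
    ∀ (lines : List String) (L : Nat),
      lines.foldl (fun (longest : Nat) line => (line.toList.foldl (fenceAStep fc) (0, longest)).2) L =
      lines.foldl (fun (longest : Nat) line => fenceBRuns fc line.toList longest) L := by
  intro lines
  induction lines with
  | nil => intro L; rfl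
  | cons l ls ih =>
      intro L
      simp only [List.foldl_cons]
      rw [fence_inner_eq, ih]

-- ===== VERDICT (by name: the statement is the Claim_ definition above) =====
theorem fence_for_py_spec : Claim_equal_fence_for_py := by
  intro lines fence_char _
  show _ = _
  simp only [fence_for_py, fence_for_py_alt]
  rw [fence_lines_eq]
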